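-- pv_equiv track=rewrite | github.com/ccctw-ma/leetcode | src/Medium/DynamicTest/bestSeqAtIndex.py | bestSeqAtIndex
-- ===== SOURCE A (Python) =====
-- from typing import List, Tuple, Union, Optional
-- from bisect import bisect_left, bisect_right, insort, insort_left, insort_right
--
-- def bestSeqAtIndex(height: List[int], weight: List[int]) -> int:
--     arr = []
--     for i in range(len(height)):
--         arr.append([height[i], weight[i]])
--     arr.sort(key=lambda x: [x[0], -x[1]])
--     arr = [x[1] for x in arr]
--     f = []
--     for v in arr:
--         index = bisect_left(f, v)
--         if index == len(f):
--             f.append(v)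
--         else:
--             f[index] = v
--     return len(f)
-- ===== SOURCE B (Python) =====
-- def bestSeqAtIndex(height, weight):
--     arr = []
--     for i in range(len(height)):
--         arr.append([height[i], weight[i]])
--     arr.sort(key=lambda x: [x[0], -x[1]])
--     arr = [x[1] for x in arr]
--     # O(n^2) DP: seen holds (value, length of longest strictly increasing
--     # subsequence ending at that value's position), in order.
--     seen = []
--     for v in arr:
--         best = 0
--         for (a, d) in seen:
--             if a < v and d > best:
--                 best = d
--         seen.append((v, best + 1))
--     return max((d for (_, d) in seen), default=0)
-- ===== Notes on version B (the rewrite author's own statement) =====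
-- stated objective: alternative
-- what changed: Keeps the identical pair-building and sort, but replaces the patience-sorting tails array with bisect_left by a quadratic dynamic program that, for each element, scans all earlier elements to compute the length of the longest strictly increasing subsequence ending there, returning the maximum.
import Mathlib
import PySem

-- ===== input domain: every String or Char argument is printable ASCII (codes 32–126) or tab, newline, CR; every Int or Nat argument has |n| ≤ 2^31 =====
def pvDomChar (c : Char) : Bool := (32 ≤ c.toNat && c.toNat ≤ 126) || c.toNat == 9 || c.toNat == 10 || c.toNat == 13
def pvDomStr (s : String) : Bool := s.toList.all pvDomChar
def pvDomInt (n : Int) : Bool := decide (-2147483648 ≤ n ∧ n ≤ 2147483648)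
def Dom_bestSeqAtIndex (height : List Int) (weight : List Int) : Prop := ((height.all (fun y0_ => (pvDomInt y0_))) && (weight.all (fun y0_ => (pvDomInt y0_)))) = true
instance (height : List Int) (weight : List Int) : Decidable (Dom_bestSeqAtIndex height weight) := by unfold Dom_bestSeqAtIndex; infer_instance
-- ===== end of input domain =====

-- B keeps A's pair-building/sort preprocessing but replaces the patience-sorting
-- bisect loop by a quadratic longest-increasing-subsequence dynamic program
-- (objective: alternative algorithm, same result).

-- ===== PORT A =====
-- Shared preprocessing, identical source code in both Pythons: build the pairs
-- [height[i], weight[i]], sort by key (x[0], -x[1]), keep the weight column.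
-- weight[i] uses pyGet? with junk default 0; Pre_ excludes the IndexError inputs.
def pvArr (height : List Int) (weight : List Int) : List Int :=
  (PySem.List.sorted2
      ((PySem.List.pyRange 0 (height.length : Int) 1).foldl
        (fun acc i =>
          acc ++ [((PySem.List.pyGet? height i).getD 0, (PySem.List.pyGet? weight i).getD 0)]) [])
      (fun x => x.1) (fun x => -x.2)).map (fun x => x.2)

-- one iteration of A's patience loop: index = bisect_left(f, v); append or replace
def pvStepA (f : List Int) (v : Int) : List Int :=
  let index := PySem.List.bisectLeft f v
  if index = f.length then f ++ [v] else f.set index v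

def bestSeqAtIndex (height : List Int) (weight : List Int) : Int :=
  (((pvArr height weight).foldl pvStepA []).length : Int)

-- ===== PORT B =====
-- inner loop of B: best = max length over earlier elements strictly below v
def pvBest (s : List (Int × Int)) (v : Int) : Int :=
  s.foldl (fun b p => if p.1 < v ∧ b < p.2 then p.2 else b) 0

-- one iteration of B's outer loop: seen.append((v, best + 1))
def pvStepB (s : List (Int × Int)) (v : Int) : List (Int × Int) :=
  s ++ [(v, pvBest s v + 1)]

def bestSeqAtIndex_alt (height : List Int) (weight : List Int) : Int :=
  PySem.List.maxD (((pvArr height weight).foldl pvStepB []).map (fun p => p.2)) (fun d => d) 0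

-- ===== PRECONDITION & SPEC =====
-- Pre_ excludes exactly the inputs where A raises IndexError: weight shorter than height.
def Pre_bestSeqAtIndex (height : List Int) (weight : List Int) : Prop :=
  height.length ≤ weight.length
instance (height : List Int) (weight : List Int) : Decidable (Pre_bestSeqAtIndex height weight) := by unfold Pre_bestSeqAtIndex; infer_instance

def pvWitness_bestSeqAtIndex : List Int × List Int := ([3, 1, 2, 1], [4, 6, 5, 7])

def Spec_bestSeqAtIndex (height : List Int) (weight : List Int) (out : Int) : Prop := out = bestSeqAtIndex_alt height weight
instance (height : List Int) (weight : List Int) (out : Int) : Decidable (Spec_bestSeqAtIndex height weight out) := by unfold Spec_bestSeqAtIndex; infer_instance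

-- ===== CLAIM (what is proved, stated in full; the proofs are below) =====
def Claim_equal_bestSeqAtIndex : Prop := ∀ (height : List Int) (weight : List Int), Dom_bestSeqAtIndex height weight → Pre_bestSeqAtIndex height weight → Spec_bestSeqAtIndex height weight (bestSeqAtIndex height weight)

-- ===== LEMMAS AND PROOFS =====

-- Joint invariant tying A's tails array f to B's (value, LIS-length) list s:
-- f is strictly increasing; every element of s sits at a level k < |f| with
-- f[k] ≤ its value; and every level k of f is witnessed by an element of s
-- whose value IS f[k].
def pvInv (f : List Int) (s : List (Int × Int)) : Prop :=
  List.Pairwise (· < ·) f ∧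
  (∀ p ∈ s, ∃ k : Nat, k < f.length ∧ p.2 = (k : Int) + 1 ∧ f.getD k 0 ≤ p.1) ∧
  (∀ k : Nat, k < f.length → ∃ p ∈ s, p.2 = (k : Int) + 1 ∧ p.1 = f.getD k 0)

lemma pvBest_fold (s : List (Int × Int)) (v : Int) : ∀ b : Int,
    b ≤ s.foldl (fun b p => if p.1 < v ∧ b < p.2 then p.2 else b) b ∧
    (∀ p ∈ s, p.1 < v → p.2 ≤ s.foldl (fun b p => if p.1 < v ∧ b < p.2 then p.2 else b) b) ∧
    (s.foldl (fun b p => if p.1 < v ∧ b < p.2 then p.2 else b) b = b ∨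
      ∃ p ∈ s, p.1 < v ∧ s.foldl (fun b p => if p.1 < v ∧ b < p.2 then p.2 else b) b = p.2) := by
  induction s with
  | nil => intro b; simp
  | cons q t ih =>
    intro b
    simp only [List.foldl_cons]
    by_cases hq : q.1 < v ∧ b < q.2
    · simp only [if_pos hq]
      obtain ⟨h1, h2, h3⟩ := ih q.2
      refine ⟨le_trans (le_of_lt hq.2) h1, ?_, ?_⟩
      · intro p hp hpv
        rcases List.mem_cons.mp hp with hp | hp
        · subst hp; exact h1
        · exact h2 p hp hpv
      · rcases h3 with h3 | ⟨p, hp, hpv, he⟩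
        · exact Or.inr ⟨q, List.mem_cons_self, hq.1, h3⟩
        · exact Or.inr ⟨p, List.mem_cons.mpr (Or.inr hp), hpv, he⟩
    · simp only [if_neg hq]
      obtain ⟨h1, h2, h3⟩ := ih b
      refine ⟨h1, ?_, ?_⟩
      · intro p hp hpv
        rcases List.mem_cons.mp hp with hp | hp
        · subst hp
          rcases not_and_or.mp hq with h | h
          · exact absurd hpv h
          · exact le_trans (le_of_not_gt h) h1
        · exact h2 p hp hpv
      · rcases h3 with h3 | ⟨p, hp, hpv, he⟩
        · exact Or.inl h3
        · exact Or.inr ⟨p, List.mem_cons.mpr (Or.inr hp), hpv, he⟩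

lemma pvBest_le (s : List (Int × Int)) (v : Int) : ∀ p ∈ s, p.1 < v → p.2 ≤ pvBest s v :=
  (pvBest_fold s v 0).2.1

lemma pvBest_nonneg (s : List (Int × Int)) (v : Int) : 0 ≤ pvBest s v :=
  (pvBest_fold s v 0).1

lemma pvBest_cases (s : List (Int × Int)) (v : Int) :
    pvBest s v = 0 ∨ ∃ p ∈ s, p.1 < v ∧ pvBest s v = p.2 :=
  (pvBest_fold s v 0).2.2

lemma pvSorted_le (f : List Int) (h : List.Pairwise (· < ·) f) :
    List.Pairwise (· ≤ ·) f := h.imp le_of_lt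

-- pvBest over s equals A's bisect_left insertion point in f, given the invariant.
lemma pvBest_eq_bisect (f : List Int) (s : List (Int × Int)) (v : Int) (hInv : pvInv f s) :
    pvBest s v = (PySem.List.bisectLeft f v : Int) := by
  obtain ⟨hsort, hmem, hwit⟩ := hInv
  obtain ⟨hle, hlt, hge⟩ := PySem.List.bisectLeft_spec f v (pvSorted_le f hsort)
  set i := PySem.List.bisectLeft f v with hi
  have hub : pvBest s v ≤ (i : Int) := by
    rcases pvBest_cases s v with h0 | ⟨p, hp, hpv, he⟩
    · omega
    · obtain ⟨k, hk, hk2, hk3⟩ := hmem p hp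
      have : k < i := by
        by_contra hc
        have : v ≤ f[k]'hk := hge k hk (by omega)
        rw [List.getD_eq_getElem f 0 hk] at hk3
        omega
      omega
  have hlb : (i : Int) ≤ pvBest s v := by
    rcases Nat.eq_zero_or_pos i with h0 | hpos
    · rw [h0]; exact_mod_cast pvBest_nonneg s v
    · have hki : i - 1 < f.length := by omega
      have hfv : f[i-1]'hki < v := hlt (i - 1) hki (by omega)
      obtain ⟨p, hp, hp2, hp1⟩ := hwit (i - 1) hki
      have : p.1 < v := by rw [hp1, List.getD_eq_getElem f 0 hki]; exact hfv
      have := pvBest_le s v p hp this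
      have : ((i - 1 : Nat) : Int) + 1 = (i : Int) := by omega
      omega
  omega

lemma pvInv_step (f : List Int) (s : List (Int × Int)) (v : Int) (hInv : pvInv f s) :
    pvInv (pvStepA f v) (pvStepB s v) := by
  obtain ⟨hsort, hmem, hwit⟩ := hInv
  obtain ⟨hle, hlt, hge⟩ := PySem.List.bisectLeft_spec f v (pvSorted_le f hsort)
  have hbest : pvBest s v = (PySem.List.bisectLeft f v : Int) :=
    pvBest_eq_bisect f s v ⟨hsort, hmem, hwit⟩
  set i := PySem.List.bisectLeft f v with hi
  unfold pvStepA pvStepB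
  simp only [← hi]
  by_cases hcase : i = f.length
  · -- append: every element of f is < v
    simp only [if_pos hcase]
    have hall : ∀ a ∈ f, a < v := by
      intro a ha
      obtain ⟨j, hj, rfl⟩ := List.getElem_of_mem ha
      exact hlt j hj (by omega)
    refine ⟨?_, ?_, ?_⟩
    · rw [List.pairwise_append]
      exact ⟨hsort, List.pairwise_singleton _ _, fun a ha b hb => by
        simp at hb; subst hb; exact hall a ha⟩
    · intro p hp
      rcases List.mem_append.mp hp with hp | hp
      · obtain ⟨k, hk, hk2, hk3⟩ := hmem p hp
        exact ⟨k, by simp; omega, hk2, by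
          rwa [List.getD_eq_getElem _ 0 (by simp; omega : k < (f ++ [v]).length),
            List.getElem_append_left hk, ← List.getD_eq_getElem f 0 hk]⟩
      · simp at hp
        subst hp
        refine ⟨f.length, by simp, ?_, ?_⟩
        · simp [hbest, hcase]
        · rw [List.getD_eq_getElem _ 0 (by simp : f.length < (f ++ [v]).length)]
          simp
    · intro k hk
      simp at hk
      rcases Nat.lt_or_ge k f.length with hkf | hkf
      · obtain ⟨p, hp, hp2, hp1⟩ := hwit k hkf
        exact ⟨p, List.mem_append_left _ hp, hp2, by
          rwa [List.getD_eq_getElem _ 0 (by simp; omega : k < (f ++ [v]).length),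
            List.getElem_append_left hkf, ← List.getD_eq_getElem f 0 hkf]⟩
      · have hkeq : k = f.length := by omega
        refine ⟨(v, pvBest s v + 1), List.mem_append_right _ (by simp), ?_, ?_⟩
        · simp [hbest, hcase, hkeq]
        · rw [hkeq, List.getD_eq_getElem _ 0 (by simp : f.length < (f ++ [v]).length)]
          simp
  · -- replace f[i] by v
    simp only [if_neg hcase]
    have hif : i < f.length := by omega
    have hvle : v ≤ f[i]'hif := hge i hif (le_refl i)
    have hget : ∀ (k : Nat) (hk : k < f.length), (f.set i v).getD k 0 = if i = k then v else f[k]'hk := by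
      intro k hk
      rw [List.getD_eq_getElem _ 0 (by simpa using hk : k < (f.set i v).length), List.getElem_set]
    refine ⟨?_, ?_, ?_⟩
    · rw [List.pairwise_iff_getElem] at hsort ⊢
      intro a b ha hb hab
      simp only [List.length_set] at ha hb
      rw [List.getElem_set, List.getElem_set]
      split_ifs with h1 h2
      · omega
      · -- a = i < b : v ≤ f[i] < f[b]
        exact lt_of_le_of_lt hvle (by subst h1; exact hsort i b hif hb hab)
      · -- b = i, a < i : f[a] < v
        exact hlt a ha (by omega)
      · exact hsort a b ha hb hab
    · intro p hp
      rcases List.mem_append.mp hp with hp | hp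
      · obtain ⟨k, hk, hk2, hk3⟩ := hmem p hp
        refine ⟨k, by simpa using hk, hk2, ?_⟩
        rw [hget k hk]
        split_ifs with h
        · subst h
          rw [List.getD_eq_getElem f 0 hk] at hk3
          omega
        · rwa [← List.getD_eq_getElem f 0 hk]
      · simp at hp
        subst hp
        refine ⟨i, by simpa using hif, by simp [hbest], ?_⟩
        rw [hget i hif, if_pos rfl]
    · intro k hk
      simp only [List.length_set] at hk
      by_cases hik : i = k
      · refine ⟨(v, pvBest s v + 1), List.mem_append_right _ (by simp), ?_, ?_⟩
        · simp [hbest, hik]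
        · rw [hget k hk, if_pos hik]
      · obtain ⟨p, hp, hp2, hp1⟩ := hwit k hk
        refine ⟨p, List.mem_append_left _ hp, hp2, ?_⟩
        rw [hget k hk, if_neg hik, hp1, List.getD_eq_getElem f 0 hk]

lemma pvInv_fold (arr : List Int) : ∀ (f : List Int) (s : List (Int × Int)),
    pvInv f s → pvInv (arr.foldl pvStepA f) (arr.foldl pvStepB s) := by
  induction arr with
  | nil => intro f s h; simpa using h
  | cons v t ih =>
    intro f s h
    simp only [List.foldl_cons]
    exact ih _ _ (pvInv_step f s v h)

lemma pvInv_final (f : List Int) (s : List (Int × Int)) (hInv : pvInv f s) :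
    (f.length : Int) = PySem.List.maxD (s.map (fun p => p.2)) (fun d => d) 0 := by
  obtain ⟨_, hmem, hwit⟩ := hInv
  by_cases hs : s = []
  · -- s empty forces f empty
    subst hs
    have : f.length = 0 := by
      by_contra h
      obtain ⟨p, hp, _⟩ := hwit 0 (by omega)
      simp at hp
    simp [this, PySem.List.maxD, PySem.List.max?]
  · -- s nonempty: max? is some m; m = f.length by the two invariant halves
    have hne : s.map (fun p => p.2) ≠ [] := by simpa using hs
    obtain ⟨m, hm⟩ : ∃ m, PySem.List.max? (s.map (fun p => p.2)) (fun d => d) = some m := by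
      cases h : PySem.List.max? (s.map (fun p => p.2)) (fun d => d) with
      | none => exact absurd ((PySem.List.max?_eq_none_iff _ _).mp h) hne
      | some m => exact ⟨m, rfl⟩
    have hmaxD : PySem.List.maxD (s.map (fun p => p.2)) (fun d => d) 0 = m := by
      simp [PySem.List.maxD, hm]
    -- m ≤ f.length : m is the dp value of some element of s
    obtain ⟨p, hp, hpm⟩ := List.mem_map.mp (PySem.List.max?_mem hm)
    obtain ⟨k, hk, hk2, _⟩ := hmem p hp
    have hub : m ≤ (f.length : Int) := by rw [← hpm]; omega
    -- f.length ≤ m : the witness at level f.length - 1 has dp value f.length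
    have hfpos : 0 < f.length := by
      obtain ⟨q, hq⟩ := List.exists_mem_of_ne_nil s hs
      obtain ⟨k', hk', _, _⟩ := hmem q hq
      omega
    obtain ⟨q, hq, hq2, _⟩ := hwit (f.length - 1) (by omega)
    have hle := PySem.List.max?_isMax hm q.2 (List.mem_map.mpr ⟨q, hq, rfl⟩)
    have hcast : ((f.length - 1 : Nat) : Int) + 1 = (f.length : Int) := by omega
    rw [hmaxD]
    omega

-- ===== VERDICT (by name: the statement is the Claim_ definition above) =====
theorem bestSeqAtIndex_spec : Claim_equal_bestSeqAtIndex := by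
  intro height weight _ _
  unfold Spec_bestSeqAtIndex bestSeqAtIndex bestSeqAtIndex_alt
  exact pvInv_final _ _ (pvInv_fold (pvArr height weight) [] [] (by simp [pvInv]))
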